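-- pv_equiv track=rewrite | github.com/rusydi16/PBML_Open-Type_NER_w_GLiNER_on_CleanCoNLL | src/inference.py | tokens_to_text_with_offsets
-- ===== SOURCE A (Python) =====
-- from typing import Any, Dict, List, Optional, Tuple
--
-- def tokens_to_text_with_offsets(
--     tokens: List[str],
-- ) -> Tuple[str, List[Tuple[int, int]]]:
--     """Join tokens with spaces and return (text, list of (char_start, char_end) per token)."""
--     offsets: List[Tuple[int, int]] = []
--     pos = 0
--     for token in tokens:
--         start = pos
--         end = pos + len(token)
--         offsets.append((start, end))
--         pos = end + 1  # +1 for the space separator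
--     text = " ".join(tokens)
--     return text, offsets
-- ===== SOURCE B (Python) =====
-- def tokens_to_text_with_offsets(tokens):
--     """Join tokens with spaces and return (text, list of (char_start, char_end) per token)."""
--     # Phase 1: prefix-sum table of start positions (one extra trailing entry).
--     starts = [0]
--     for t in tokens:
--         starts.append(starts[-1] + len(t) + 1)
--     # Phase 2: map each token to its (start, start + len) pair; zip truncates the extra entry.
--     offsets = [(s, s + len(t)) for s, t in zip(starts, tokens)]
--     return " ".join(tokens), offsets
-- ===== Notes on version B (the rewrite author's own statement) =====
-- stated objective: alternative
-- what changed: Replaces A's single loop carrying a running position and appending offset pairs by two separate phases: first a prefix-sum table of token start positions, then a zip/map turning each (start, token) pair into its offset pair.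
import Mathlib
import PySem

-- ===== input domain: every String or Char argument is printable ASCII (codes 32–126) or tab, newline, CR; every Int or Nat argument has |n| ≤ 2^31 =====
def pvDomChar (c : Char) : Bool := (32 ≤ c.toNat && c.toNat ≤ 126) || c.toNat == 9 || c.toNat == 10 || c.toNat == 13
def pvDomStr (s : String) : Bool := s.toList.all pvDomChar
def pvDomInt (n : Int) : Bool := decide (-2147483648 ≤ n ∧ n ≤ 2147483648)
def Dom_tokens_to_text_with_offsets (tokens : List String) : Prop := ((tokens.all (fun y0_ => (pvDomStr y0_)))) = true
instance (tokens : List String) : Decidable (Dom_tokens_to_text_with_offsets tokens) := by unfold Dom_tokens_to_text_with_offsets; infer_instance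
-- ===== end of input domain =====

-- B replaces A's single running-position loop by two phases (prefix-sum start table, then zip/map); alternative decomposition, same cost.


-- ===== PORT A =====
-- A: one loop over tokens carrying (offsets so far, current position).
def tokens_to_text_with_offsets (tokens : List String) : String × (List (Int × Int)) :=
  let st := tokens.foldl
    (fun (st : List (Int × Int) × Int) token =>
      let start := st.2
      let fin := st.2 + PySem.Str.len token
      (st.1 ++ [(start, fin)], fin + 1))
    ([], 0)
  (PySem.Str.join " " tokens, st.1)

-- ===== PORT B =====
-- B phase 1: prefix-sum table of start positions ('starts[-1]' ported as pyGetD _ (-1) 0).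
def pvStartsTable (tokens : List String) : List Int :=
  tokens.foldl
    (fun starts t => starts ++ [PySem.List.pyGetD starts (-1) 0 + PySem.Str.len t + 1])
    [0]

-- B phase 2: zip the table with the tokens (truncating the extra entry) and map to pairs.
def tokens_to_text_with_offsets_alt (tokens : List String) : String × (List (Int × Int)) :=
  let offsets := ((pvStartsTable tokens).zip tokens).map
    (fun st => (st.1, st.1 + PySem.Str.len st.2))
  (PySem.Str.join " " tokens, offsets)

-- ===== PRECONDITION & SPEC =====
def Spec_tokens_to_text_with_offsets (tokens : List String) (out : String × (List (Int × Int))) : Prop := out = tokens_to_text_with_offsets_alt tokens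
instance (tokens : List String) (out : String × (List (Int × Int))) : Decidable (Spec_tokens_to_text_with_offsets tokens out) := by unfold Spec_tokens_to_text_with_offsets; infer_instance

-- ===== CLAIM (what is proved, stated in full; the proofs are below) =====
def Claim_equal_tokens_to_text_with_offsets : Prop := ∀ (tokens : List String), Dom_tokens_to_text_with_offsets tokens → Spec_tokens_to_text_with_offsets tokens (tokens_to_text_with_offsets tokens)

-- ===== LEMMAS AND PROOFS =====

-- Reference shape: the offsets of ts when the first token starts at p.
def pvOffsFrom (p : Int) : List String → List (Int × Int)
  | [] => []
  | t :: ts => (p, p + PySem.Str.len t) :: pvOffsFrom (p + PySem.Str.len t + 1) ts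

-- Tail of the starts table after p.
def pvStartsFrom (p : Int) : List String → List Int
  | [] => []
  | t :: ts => (p + PySem.Str.len t + 1) :: pvStartsFrom (p + PySem.Str.len t + 1) ts

lemma pyGetD_neg_one_last (xs : List Int) (p : Int) :
    PySem.List.pyGetD (xs ++ [p]) (-1) 0 = p := by
  simp [PySem.List.pyGetD, PySem.List.pyGet?, PySem.List.pyIdx?]

lemma foldlA_eq (ts : List String) : ∀ (offs : List (Int × Int)) (p : Int),
    (ts.foldl
      (fun (st : List (Int × Int) × Int) token =>
        (st.1 ++ [(st.2, st.2 + PySem.Str.len token)], st.2 + PySem.Str.len token + 1))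
      (offs, p)).1 = offs ++ pvOffsFrom p ts := by
  induction ts with
  | nil => intro offs p; simp [pvOffsFrom]
  | cons t ts ih =>
    intro offs p
    simp only [List.foldl_cons, pvOffsFrom]
    rw [ih]
    simp

lemma foldlB_eq (ts : List String) : ∀ (acc : List Int) (p : Int),
    ts.foldl
      (fun starts t => starts ++ [PySem.List.pyGetD starts (-1) 0 + PySem.Str.len t + 1])
      (acc ++ [p]) = acc ++ [p] ++ pvStartsFrom p ts := by
  induction ts with
  | nil => intro acc p; simp [pvStartsFrom]
  | cons t ts ih =>
    intro acc p
    simp only [List.foldl_cons, pvStartsFrom]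
    rw [pyGetD_neg_one_last, ih]
    simp

lemma zip_starts_map (ts : List String) : ∀ (p : Int),
    ((p :: pvStartsFrom p ts).zip ts).map
      (fun st : Int × String => (st.1, st.1 + PySem.Str.len st.2)) = pvOffsFrom p ts := by
  induction ts with
  | nil => intro p; simp [pvOffsFrom]
  | cons t ts ih =>
    intro p
    simp only [pvStartsFrom, pvOffsFrom, List.zip_cons_cons, List.map_cons]
    exact congrArg _ (ih _)

-- ===== VERDICT (by name: the statement is the Claim_ definition above) =====
theorem tokens_to_text_with_offsets_spec : Claim_equal_tokens_to_text_with_offsets := by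
  intro tokens _
  unfold Spec_tokens_to_text_with_offsets tokens_to_text_with_offsets
    tokens_to_text_with_offsets_alt pvStartsTable
  have hB := foldlB_eq tokens [] 0
  simp only [List.nil_append] at hB
  rw [hB]
  have hA := foldlA_eq tokens [] 0
  simp only [List.nil_append] at hA
  simp only [hA, List.cons_append, List.nil_append] at *
  exact congrArg _ (zip_starts_map tokens 0).symm
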